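-- pv_equiv track=rewrite | github.com/KCDevCrew/AdventOfCode2023 | TheoreticalHybrid/Day_13/main.py | checkReflection
-- ===== SOURCE A (Python) =====
-- from copy import deepcopy
--
-- def rowsOffByOne(row1, row2):
--     ob1 = False
--     for j, c in enumerate(row1):
--         if c != row2[j]:
--             if ob1:
--                 return False
--             else:
--                 ob1 = True
--
--     return ob1
--
-- def checkReflection(pattern, rowNum, allowAdjustments):
--     # I mixed symbolism here and used left/right instead of higher/lower, my bad
--     lr, rr = rowNum, rowNum + 1 # initialize lr (left row) and rr (right row) indexes
--
--     p = deepcopy(pattern)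
--
--     while lr >= 0 and rr < len(p): # while inside the bounds of the grid
--         leftPattern, rightPattern = p[lr], p[rr] # get the left and right row values
--         if leftPattern == rightPattern: # if they match, move the indexes out 1 and repeat
--             lr = lr - 1
--             rr += 1
--         else: # they don't match
--             if allowAdjustments: # if we're allowing adjustments (smudge correction)
--                 if rowsOffByOne(leftPattern, rightPattern): # if they're off by one
--                     p[lr] = rightPattern # set the left pattern to the value of the right pattern
--                     if checkReflection(p, rowNum, False): return True # if this produces a valid grid reflection (disallowing further adjustments) then this is a valid reflection
--
--                     p[lr] = leftPattern # reset the left pattern to it's original value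
--                     p[rr] = leftPattern # set the right pattern to the value of the left pattern
--                     return checkReflection(p, rowNum, False) # if this produces a valid grid reflection (disallowing further adjustments) then this is a valid reflection, otherwise this is not a valid reflection
--                 else: return False # they're not off by only one, this is an invalid reflection
--             else: return False # no adjustments allowed, this is an invalid reflection
--
--     return True # Didn't find any disqualifications, therefore it's a valid reflection
-- ===== SOURCE B (Python) =====
-- def checkReflection(pattern, rowNum, allowAdjustments):
--     # Single outward walk with a smudge budget instead of deepcopy + recursion.
--     budget = 1 if allowAdjustments else 0
--     lr, rr = rowNum, rowNum + 1
--     n = len(pattern)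
--     while lr >= 0 and rr < n:
--         a, b = pattern[lr], pattern[rr]
--         if a != b:
--             if budget == 0:
--                 return False
--             d = 0
--             for j in range(len(a)):
--                 if a[j] != b[j]:
--                     d += 1
--                     if d > 1:
--                         return False
--             if d != 1:
--                 return False
--             budget = 0
--         lr -= 1
--         rr += 1
--     return True
-- ===== Notes on version B (the rewrite author's own statement) =====
-- stated objective: simpler
-- what changed: A's deepcopy + row substitution + restart-recursion on a mismatch is replaced by a single outward walk that carries a smudge budget and counts per-cell differences of the one repairable pair in place.
import Mathlib
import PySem

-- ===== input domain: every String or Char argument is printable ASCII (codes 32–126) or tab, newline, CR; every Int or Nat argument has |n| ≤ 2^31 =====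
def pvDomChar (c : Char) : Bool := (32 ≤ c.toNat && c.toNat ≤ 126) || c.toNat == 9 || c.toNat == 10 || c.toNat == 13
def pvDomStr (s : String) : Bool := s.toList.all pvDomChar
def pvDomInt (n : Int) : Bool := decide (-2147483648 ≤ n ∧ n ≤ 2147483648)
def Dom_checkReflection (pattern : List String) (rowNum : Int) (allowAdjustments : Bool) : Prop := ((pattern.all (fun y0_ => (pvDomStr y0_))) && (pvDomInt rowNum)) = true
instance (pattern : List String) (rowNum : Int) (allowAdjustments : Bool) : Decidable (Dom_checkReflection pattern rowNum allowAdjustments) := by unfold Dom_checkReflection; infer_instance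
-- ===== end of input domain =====

-- B replaces A's deepcopy + row substitution + restart-recursion by one outward walk with a smudge budget (objective: simpler; same return value, A's IndexError inputs excluded by Pre_).

-- p[i] for an index the loop guard has already checked (0 ≤ i < len p); Python-exact there.
def pvRow (p : List String) (i : Int) : String := PySem.List.pyGetD p i ""

-- ===== PORT A =====
-- rowsOffByOne's loop: `for j, c in enumerate(row1): if c != row2[j]: …`
def rowsOffByOneGo (cs : List Char) (row2 : List Char) (j : Nat) (ob1 : Bool) : Bool :=
  match cs with
  | [] => ob1
  | c :: rest =>
    match row2[j]? with
    | none => false            -- row2[j] raises IndexError in Python; such inputs are excluded by Pre_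
    | some c2 =>
      if c ≠ c2 then
        if ob1 then false else rowsOffByOneGo rest row2 (j + 1) true
      else rowsOffByOneGo rest row2 (j + 1) ob1

def rowsOffByOne (row1 row2 : String) : Bool :=
  rowsOffByOneGo row1.toList row2.toList 0 false

-- the `while lr >= 0 and rr < len(p)` loop of checkReflection(p, rowNum, False) (no adjustments allowed)
def crFalse (p : List String) (lr rr : Int) : Bool :=
  if h : 0 ≤ lr ∧ rr < (p.length : Int) then
    if pvRow p lr = pvRow p rr then crFalse p (lr - 1) (rr + 1) else false
  else true
termination_by ((p.length : Int) - rr).toNat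
decreasing_by omega

-- the same loop with allowAdjustments=True: on a mismatch it substitutes a row and restarts with False
def crTrue (p : List String) (rowNum lr rr : Int) : Bool :=
  if h : 0 ≤ lr ∧ rr < (p.length : Int) then
    if pvRow p lr = pvRow p rr then crTrue p rowNum (lr - 1) (rr + 1)
    else if rowsOffByOne (pvRow p lr) (pvRow p rr) then
      -- p[lr] = rightPattern; then checkReflection(p, rowNum, False)
      if crFalse (PySem.List.pySetD p lr (pvRow p rr)) rowNum (rowNum + 1) then true
      else
        -- p[lr] = leftPattern; p[rr] = leftPattern; then checkReflection(p, rowNum, False)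
        crFalse (PySem.List.pySetD (PySem.List.pySetD (PySem.List.pySetD p lr (pvRow p rr)) lr (pvRow p lr)) rr (pvRow p lr)) rowNum (rowNum + 1)
    else false
  else true
termination_by ((p.length : Int) - rr).toNat
decreasing_by omega

def checkReflection (pattern : List String) (rowNum : Int) (allowAdjustments : Bool) : Bool :=
  -- p = deepcopy(pattern) is semantically the identity here (return value only)
  if allowAdjustments then crTrue pattern rowNum rowNum (rowNum + 1)
  else crFalse pattern rowNum (rowNum + 1)

-- ===== PORT B =====
-- B's inner `for j in range(len(a))` counting loop; returns the count d (2 stands for the early `return False` at d > 1)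
def altScanD (cs b : List Char) (j : Nat) (d : Int) : Int :=
  match cs with
  | [] => d
  | c :: rest =>
    match b[j]? with
    | none => 2                -- b[j] raises IndexError in Python; such inputs are excluded by Pre_
    | some c2 =>
      if c ≠ c2 then
        if d + 1 > 1 then 2 else altScanD rest b (j + 1) (d + 1)
      else altScanD rest b (j + 1) d

-- B's single `while lr >= 0 and rr < n` walk carrying the smudge budget
def altLoop (p : List String) (budget : Int) (lr rr : Int) : Bool :=
  if h : 0 ≤ lr ∧ rr < (p.length : Int) then
    if pvRow p lr = pvRow p rr then altLoop p budget (lr - 1) (rr + 1)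
    else if budget = 0 then false
    else if altScanD (pvRow p lr).toList (pvRow p rr).toList 0 0 = 1 then altLoop p 0 (lr - 1) (rr + 1)
    else false
  else true
termination_by ((p.length : Int) - rr).toNat
decreasing_by all_goals omega

def checkReflection_alt (pattern : List String) (rowNum : Int) (allowAdjustments : Bool) : Bool :=
  altLoop pattern (if allowAdjustments then 1 else 0) rowNum (rowNum + 1)

-- ===== PRECONDITION & SPEC =====
-- A's per-cell compare raises IndexError iff the right row is shorter than the left one and agrees with it
-- on all but at most one of the right row's positions:
def pvPairRaises (a b : String) : Bool :=
  decide (b.toList.length < a.toList.length) &&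
  decide ((a.toList.zip b.toList).countP (fun q => q.1 != q.2) ≤ 1)

-- Pre_ excludes EXACTLY the inputs on which Python A raises IndexError (A returns no value there; B raises identically):
-- adjustments allowed and the first unequal mirrored pair of rows has the raising shape above.
def Pre_checkReflection (pattern : List String) (rowNum : Int) (allowAdjustments : Bool) : Prop :=
  allowAdjustments = true →
    ∀ i : Nat, i < pattern.length →
      (0 ≤ rowNum - i ∧ rowNum + 1 + i < (pattern.length : Int) ∧
        (∀ k : Nat, k < i → pvRow pattern (rowNum - k) = pvRow pattern (rowNum + 1 + k)) ∧
        pvRow pattern (rowNum - i) ≠ pvRow pattern (rowNum + 1 + i)) →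
      pvPairRaises (pvRow pattern (rowNum - i)) (pvRow pattern (rowNum + 1 + i)) = false

instance (pattern : List String) (rowNum : Int) (allowAdjustments : Bool) : Decidable (Pre_checkReflection pattern rowNum allowAdjustments) := by
  unfold Pre_checkReflection; infer_instance

def pvWitness_checkReflection : List String × Int × Bool := (["#.", "..", "..", "#."], 1, true)

def Spec_checkReflection (pattern : List String) (rowNum : Int) (allowAdjustments : Bool) (out : Bool) : Prop := out = checkReflection_alt pattern rowNum allowAdjustments
instance (pattern : List String) (rowNum : Int) (allowAdjustments : Bool) (out : Bool) : Decidable (Spec_checkReflection pattern rowNum allowAdjustments out) := by unfold Spec_checkReflection; infer_instance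

-- ===== CLAIM (what is proved, stated in full; the proofs are below) =====
def Claim_equal_checkReflection : Prop := ∀ (pattern : List String) (rowNum : Int) (allowAdjustments : Bool), Dom_checkReflection pattern rowNum allowAdjustments → Pre_checkReflection pattern rowNum allowAdjustments → Spec_checkReflection pattern rowNum allowAdjustments (checkReflection pattern rowNum allowAdjustments)

-- ===== LEMMAS AND PROOFS =====
-- (the ports agree on ALL inputs; Pre_ is needed only so the Python sides return at all)

theorem scan_iff (b : List Char) : ∀ (cs : List Char) (j : Nat) (ob1 : Bool),
    (altScanD cs b j (if ob1 then 1 else 0) = 1) ↔ rowsOffByOneGo cs b j ob1 = true := by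
  intro cs
  induction cs with
  | nil => intro j ob1; cases ob1 <;> simp [altScanD, rowsOffByOneGo]
  | cons c rest ih =>
    intro j ob1
    simp only [altScanD, rowsOffByOneGo]
    cases hb : b[j]? with
    | none => cases ob1 <;> simp
    | some c2 =>
      by_cases hc : c = c2
      · cases ob1 with
        | false => simpa [hc] using ih (j + 1) false
        | true => simpa [hc] using ih (j + 1) true
      · cases ob1 with
        | false => simpa [hc] using ih (j + 1) true
        | true => simp [hc]

theorem pvRow_nonneg (p : List String) (j : Int) (hj : 0 ≤ j) :
    pvRow p j = (p[j.toNat]?).getD "" := by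
  obtain ⟨n, rfl⟩ : ∃ n : Nat, j = (n : Int) := ⟨j.toNat, (Int.toNat_of_nonneg hj).symm⟩
  unfold pvRow
  rw [PySem.List.pyGetD_natCast, List.getD_eq_getElem?_getD, Int.toNat_natCast]

theorem pvRow_set_self (p : List String) (i : Int) (v : String)
    (h0 : 0 ≤ i) (h1 : i < (p.length : Int)) :
    pvRow (PySem.List.pySetD p i v) i = v := by
  rw [PySem.List.pySetD_of_nonneg _ _ h0, pvRow_nonneg _ _ h0,
    List.getElem?_set_self (by omega)]
  rfl

theorem pvRow_set_other (p : List String) (i j : Int) (v : String)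
    (h0 : 0 ≤ i) (hj : 0 ≤ j) (hne : j ≠ i) :
    pvRow (PySem.List.pySetD p i v) j = pvRow p j := by
  rw [PySem.List.pySetD_of_nonneg _ _ h0, pvRow_nonneg _ _ hj, pvRow_nonneg _ _ hj,
    List.getElem?_set_ne (by omega)]

theorem crFalse_eq_altLoop0 (p : List String) : ∀ (m : Nat) (lr rr : Int),
    (p.length : Int) - rr ≤ m → crFalse p lr rr = altLoop p 0 lr rr := by
  intro m
  induction m with
  | zero =>
    intro lr rr hm
    rw [crFalse, dif_neg (by omega), altLoop, dif_neg (by omega)]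
  | succ m ih =>
    intro lr rr hm
    rw [crFalse, altLoop]
    by_cases hg : 0 ≤ lr ∧ rr < (p.length : Int)
    · rw [dif_pos hg, dif_pos hg]
      by_cases he : pvRow p lr = pvRow p rr
      · rw [if_pos he, if_pos he]
        exact ih (lr - 1) (rr + 1) (by omega)
      · simp [he]
    · rw [dif_neg hg, dif_neg hg]

theorem crFalse_step (p : List String) (l r : Int)
    (h : 0 ≤ l ∧ r < (p.length : Int) → pvRow p l = pvRow p r) :
    crFalse p l r = crFalse p (l - 1) (r + 1) := by
  by_cases hg : 0 ≤ l ∧ r < (p.length : Int)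
  · rw [crFalse, dif_pos hg, if_pos (h hg)]
  · rw [crFalse, dif_neg hg, crFalse, dif_neg (by omega)]

theorem crFalse_skip (p : List String) (s : Int) : ∀ (i : Nat),
    (∀ k : Nat, k < i → pvRow p (s - k) = pvRow p (s + 1 + k)) →
    crFalse p s (s + 1) = crFalse p (s - i) (s + 1 + i) := by
  intro i
  induction i with
  | zero => intro _; norm_num
  | succ n ih =>
    intro hinv
    rw [ih (fun k hk => hinv k (by omega)),
      crFalse_step p (s - n) (s + 1 + n) (fun _ => hinv n (by omega))]
    congr 1 <;> push_cast <;> ring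

theorem crFalse_congr (p q : List String) (hl : (p.length : Int) = q.length) : ∀ (m : Nat) (l r : Int),
    0 ≤ r → (p.length : Int) - r ≤ m →
    (∀ j : Int, 0 ≤ j → (j ≤ l ∨ r ≤ j) → pvRow p j = pvRow q j) →
    crFalse p l r = crFalse q l r := by
  intro m
  induction m with
  | zero =>
    intro l r hr hm _
    conv_lhs => rw [crFalse]
    conv_rhs => rw [crFalse]
    rw [dif_neg (by omega), dif_neg (by omega)]
  | succ m ih =>
    intro l r hr hm hag
    conv_lhs => rw [crFalse]
    conv_rhs => rw [crFalse]
    by_cases hg : 0 ≤ l ∧ r < (p.length : Int)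
    · rw [dif_pos hg, dif_pos (by omega)]
      have hL : pvRow p l = pvRow q l := hag l hg.1 (Or.inl le_rfl)
      have hR : pvRow p r = pvRow q r := hag r hr (Or.inr le_rfl)
      rw [hL, hR]
      by_cases he : pvRow q l = pvRow q r
      · rw [if_pos he, if_pos he]
        exact ih (l - 1) (r + 1) (by omega) (by omega) (fun j hj hjr => hag j hj (by omega))
      · rw [if_neg he, if_neg he]
    · rw [dif_neg hg, dif_neg (by omega)]

-- after fixing the mismatched pair (by either substitution), A's restart from rowNum
-- re-walks the already-equal inner pairs and then scans outward from (lr-1, rr+1) in the ORIGINAL p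
theorem crFalse_restart (p q : List String) (rowNum : Int) (i : Nat)
    (hl : (p.length : Int) = q.length)
    (hout : ∀ j : Int, 0 ≤ j → j ≠ rowNum - i → j ≠ rowNum + 1 + i → pvRow q j = pvRow p j)
    (hpair : pvRow q (rowNum - i) = pvRow q (rowNum + 1 + i))
    (hinv : ∀ k : Nat, k < i → pvRow p (rowNum - k) = pvRow p (rowNum + 1 + k))
    (hlr : 0 ≤ rowNum - (i : Int)) (hrr : rowNum + 1 + (i : Int) < (p.length : Int)) :
    crFalse q rowNum (rowNum + 1) = crFalse p (rowNum - i - 1) (rowNum + 1 + i + 1) := by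
  have hskip : crFalse q rowNum (rowNum + 1) = crFalse q (rowNum - (i + 1 : Nat)) (rowNum + 1 + (i + 1 : Nat)) := by
    apply crFalse_skip
    intro k hk
    rcases Nat.lt_succ_iff_lt_or_eq.mp hk with hk' | hk'
    · rw [hout _ (by omega) (by omega) (by omega), hout _ (by omega) (by omega) (by omega)]
      exact hinv k hk'
    · subst hk'; exact hpair
  rw [hskip, show (rowNum - (i + 1 : Nat) : Int) = rowNum - i - 1 by push_cast; ring,
    show (rowNum + 1 + (i + 1 : Nat) : Int) = rowNum + 1 + i + 1 by push_cast; ring]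
  exact crFalse_congr q p (by omega) ((q.length : Int) - (rowNum + 1 + i + 1)).toNat _ _ (by omega) (by omega)
    (fun j hj hjr => hout j hj (by omega) (by omega))

theorem crTrue_eq (p : List String) (rowNum : Int) : ∀ (m : Nat) (i : Nat),
    (p.length : Int) - (rowNum + 1 + i) ≤ m →
    (∀ k : Nat, k < i → pvRow p (rowNum - k) = pvRow p (rowNum + 1 + k)) →
    crTrue p rowNum (rowNum - i) (rowNum + 1 + i) = altLoop p 1 (rowNum - i) (rowNum + 1 + i) := by
  intro m
  induction m with
  | zero =>
    intro i hm _
    rw [crTrue, dif_neg (by omega), altLoop, dif_neg (by omega)]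
  | succ m ih =>
    intro i hm hinv
    rw [crTrue, altLoop]
    by_cases hg : 0 ≤ rowNum - (i : Int) ∧ rowNum + 1 + (i : Int) < (p.length : Int)
    · rw [dif_pos hg, dif_pos hg]
      have hlr : (0:Int) ≤ rowNum - i := hg.1
      have hrr : rowNum + 1 + (i : Int) < (p.length : Int) := hg.2
      have hlt : rowNum - (i : Int) < rowNum + 1 + i := by omega
      by_cases he : pvRow p (rowNum - (i : Int)) = pvRow p (rowNum + 1 + (i : Int))
      · rw [if_pos he, if_pos he]
        have hrec := ih (i + 1) (by push_cast; omega) (by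
          intro k hk
          rcases Nat.lt_succ_iff_lt_or_eq.mp hk with hk' | hk'
          · exact hinv k hk'
          · subst hk'; exact he)
        rw [show (rowNum - ((i : Nat) + 1 : Nat) : Int) = rowNum - i - 1 by push_cast; ring,
          show (rowNum + 1 + ((i : Nat) + 1 : Nat) : Int) = rowNum + 1 + i + 1 by push_cast; ring] at hrec
        exact hrec
      · rw [if_neg he, if_neg he, if_neg (by norm_num : ¬((1:Int) = 0))]
        by_cases hob : rowsOffByOne (pvRow p (rowNum - (i : Int))) (pvRow p (rowNum + 1 + (i : Int))) = true
        · rw [if_pos hob]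
          have hscan : altScanD (pvRow p (rowNum - (i : Int))).toList (pvRow p (rowNum + 1 + (i : Int))).toList 0 0 = 1 := by
            have h := scan_iff (pvRow p (rowNum + 1 + (i : Int))).toList (pvRow p (rowNum - (i : Int))).toList 0 false
            simp only [Bool.false_eq_true, if_false] at h
            simpa using h.mpr hob
          rw [if_pos hscan]
          -- both substituted restarts compute the plain outward scan of p from (lr-1, rr+1)
          have h1 : crFalse (PySem.List.pySetD p (rowNum - (i : Int)) (pvRow p (rowNum + 1 + (i : Int)))) rowNum (rowNum + 1)
              = crFalse p (rowNum - i - 1) (rowNum + 1 + i + 1) := by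
            apply crFalse_restart p _ rowNum i (by rw [PySem.List.length_pySetD]) _ _ hinv hlr hrr
            · intro j hj hj1 _
              exact pvRow_set_other p _ j _ hlr hj hj1
            · rw [pvRow_set_self p _ _ hlr (by omega),
                pvRow_set_other p _ _ _ hlr (by omega) (by omega)]
          have h2 : crFalse (PySem.List.pySetD (PySem.List.pySetD (PySem.List.pySetD p (rowNum - (i : Int)) (pvRow p (rowNum + 1 + (i : Int)))) (rowNum - (i : Int)) (pvRow p (rowNum - (i : Int)))) (rowNum + 1 + (i : Int)) (pvRow p (rowNum - (i : Int)))) rowNum (rowNum + 1)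
              = crFalse p (rowNum - i - 1) (rowNum + 1 + i + 1) := by
            apply crFalse_restart p _ rowNum i
              (by rw [PySem.List.length_pySetD, PySem.List.length_pySetD, PySem.List.length_pySetD])
              _ _ hinv hlr hrr
            · intro j hj hj1 hj2
              rw [pvRow_set_other _ _ j _ (by omega) hj hj2,
                pvRow_set_other _ _ j _ hlr hj hj1,
                pvRow_set_other _ _ j _ hlr hj hj1]
            · rw [pvRow_set_other _ _ _ _ (by omega) hlr (by omega),
                pvRow_set_self _ _ _ hlr (by simp [PySem.List.length_pySetD]; omega),
                pvRow_set_self _ _ _ (by omega) (by simp [PySem.List.length_pySetD]; omega)]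
          rw [h1, h2]
          rw [crFalse_eq_altLoop0 p ((p.length : Int) - (rowNum + 1 + i + 1)).toNat _ _ (by omega)]
          cases altLoop p 0 (rowNum - (i : Int) - 1) (rowNum + 1 + (i : Int) + 1) <;> simp
        · rw [if_neg hob]
          have hscan : ¬ altScanD (pvRow p (rowNum - (i : Int))).toList (pvRow p (rowNum + 1 + (i : Int))).toList 0 0 = 1 := by
            intro hx
            apply hob
            have h := scan_iff (pvRow p (rowNum + 1 + (i : Int))).toList (pvRow p (rowNum - (i : Int))).toList 0 false
            simp only [Bool.false_eq_true, if_false] at h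
            exact h.mp (by simpa using hx)
          rw [if_neg hscan]
    · rw [dif_neg hg, dif_neg hg]

-- ===== VERDICT (by name: the statement is the Claim_ definition above) =====
theorem checkReflection_spec : Claim_equal_checkReflection := by
  intro pattern rowNum allow _ _
  unfold Spec_checkReflection checkReflection checkReflection_alt
  cases allow with
  | false =>
    simp only [Bool.false_eq_true, if_false]
    exact crFalse_eq_altLoop0 pattern ((pattern.length : Int) - (rowNum + 1)).toNat rowNum (rowNum + 1) (by omega)
  | true =>
    simp only [if_true]
    have h := crTrue_eq pattern rowNum ((pattern.length : Int) - (rowNum + 1)).toNat 0 (by push_cast; omega) (by omega)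
    simpa using h
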